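-- pv_equiv track=rewrite | github.com/dleemiller/CnakeCharmer | data/grpo_problems/advent_fuel_calc.py | advent_fuel_calc
-- ===== SOURCE A (Python) =====
-- def advent_fuel_calc(n):
--     """Calculate total fuel for n modules (Advent of Code style).
--
--     Each module mass is deterministic. Fuel = mass/3 - 2, recursively
--     until fuel <= 0. Returns (total_fuel, max_single_fuel, modules_needing_fuel).
--     """
--     total = 0
--     max_fuel = 0
--     modules_with_fuel = 0
--
--     for i in range(n):
--         mass = 100 + (i * 37 + 13) % 900
--         fuel = 0
--         m = mass
--         while True:
--             f = m // 3 - 2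
--             if f <= 0:
--                 break
--             fuel += f
--             m = f
--         total += fuel
--         if fuel > max_fuel:
--             max_fuel = fuel
--         if fuel > 0:
--             modules_with_fuel += 1
--
--     return (total, max_fuel, modules_with_fuel)
-- ===== SOURCE B (Python) =====
-- def advent_fuel_calc(n):
--     """Calculate total fuel for n modules (Advent of Code style).
--
--     Masses repeat with period 900 (i*37+13 mod 900, gcd(37,900)=1), so
--     precompute the 900 per-module fuels once and combine full cycles
--     with the remaining prefix in O(900) instead of O(n)."""
--     def fuel_for(mass):
--         fuel = 0
--         m = mass // 3 - 2
--         while m > 0: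
--             fuel += m
--             m = m // 3 - 2
--         return fuel
--
--     if n <= 0:
--         return (0, 0, 0)
--
--     fuels = [fuel_for(100 + (i * 37 + 13) % 900) for i in range(900)]
--     cycle_sum = sum(fuels)
--     cycle_max = max(fuels)
--     cycle_cnt = sum(1 for f in fuels if f > 0)
--
--     q, r = divmod(n, 900)
--     prefix = fuels[:r]
--     total = q * cycle_sum + sum(prefix)
--     max_fuel = cycle_max if q > 0 else max(prefix, default=0)
--     modules = q * cycle_cnt + sum(1 for f in prefix if f > 0)
--     return (total, max_fuel, modules)
-- ===== Notes on version B (the rewrite author's own statement) =====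
-- stated objective: faster
-- what changed: B precomputes the 900-long periodic table of per-module fuels once and combines full cycles (multiplication) with the remaining prefix, instead of A's loop over all n modules.
import Mathlib
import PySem

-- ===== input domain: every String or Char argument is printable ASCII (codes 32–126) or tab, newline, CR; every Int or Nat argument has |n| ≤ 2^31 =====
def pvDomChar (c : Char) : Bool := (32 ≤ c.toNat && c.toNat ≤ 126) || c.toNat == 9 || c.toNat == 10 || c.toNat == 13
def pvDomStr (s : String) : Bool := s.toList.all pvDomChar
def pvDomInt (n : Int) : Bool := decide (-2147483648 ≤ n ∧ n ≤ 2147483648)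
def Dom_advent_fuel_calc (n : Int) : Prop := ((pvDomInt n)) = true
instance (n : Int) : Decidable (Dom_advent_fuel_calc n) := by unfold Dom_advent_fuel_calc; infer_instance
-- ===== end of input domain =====

-- B replaces A's per-module loop over all n modules by precomputing the 900-periodic
-- per-module fuels once and combining full cycles with the remaining prefix (objective: faster, O(1) in n).

-- ===== PORT A =====
-- A's inner `while True` loop: m ← m//3-2 accumulated until the new value is ≤ 0
-- (the Nat counter only bounds the iteration count for totality; m.toNat steps always suffice).
def fuelA : Nat → Int → Int → Int
  | 0, _, acc => acc
  | k + 1, m, acc =>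
    if PySem.Int.floordiv m 3 - 2 ≤ 0 then acc
    else fuelA k (PySem.Int.floordiv m 3 - 2) (acc + (PySem.Int.floordiv m 3 - 2))

def advent_fuel_calc (n : Int) : List Int :=
  let st := (PySem.List.pyRange 0 n 1).foldl
    (fun (st : Int × Int × Int) i =>
      let mass : Int := 100 + PySem.Int.mod (i * 37 + 13) 900
      let fuel := fuelA mass.toNat mass 0
      (st.1 + fuel,
       if fuel > st.2.1 then fuel else st.2.1,
       if fuel > 0 then st.2.2 + 1 else st.2.2))
    (0, 0, 0)
  [st.1, st.2.1, st.2.2]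

-- ===== PORT B =====
-- B's inner `while m > 0` loop of fuel_for (same totality counter scheme).
def fuelB : Nat → Int → Int → Int
  | 0, _, acc => acc
  | k + 1, m, acc =>
    if m ≤ 0 then acc
    else fuelB k (PySem.Int.floordiv m 3 - 2) (acc + m)

def fuelFor (mass : Int) : Int :=
  fuelB (PySem.Int.floordiv mass 3 - 2).toNat (PySem.Int.floordiv mass 3 - 2) 0

def advent_fuel_calc_alt (n : Int) : List Int :=
  if n ≤ 0 then [0, 0, 0]
  else
    let fuels := (PySem.List.pyRange 0 900 1).map
      (fun i => fuelFor (100 + PySem.Int.mod (i * 37 + 13) 900))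
    let cycleSum := fuels.sum
    let cycleMax := PySem.List.maxD fuels (fun x => x) 0
    let cycleCnt := (fuels.map (fun f => if f > 0 then (1 : Int) else 0)).sum
    let q := PySem.Int.floordiv n 900
    let r := PySem.Int.mod n 900
    let pre := PySem.List.slice fuels none (some r)
    let total := q * cycleSum + pre.sum
    let maxFuel := if q > 0 then cycleMax else PySem.List.maxD pre (fun x => x) 0
    let modules := q * cycleCnt + (pre.map (fun f => if f > 0 then (1 : Int) else 0)).sum
    [total, maxFuel, modules]

-- ===== PRECONDITION & SPEC =====
def Spec_advent_fuel_calc (n : Int) (out : List Int) : Prop := out = advent_fuel_calc_alt n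
instance (n : Int) (out : List Int) : Decidable (Spec_advent_fuel_calc n out) := by unfold Spec_advent_fuel_calc; infer_instance

-- ===== CLAIM (what is proved, stated in full; the proofs are below) =====
def Claim_equal_advent_fuel_calc : Prop := ∀ (n : Int), Dom_advent_fuel_calc n → Spec_advent_fuel_calc n (advent_fuel_calc n)

-- ===== LEMMAS AND PROOFS =====

-- per-module fuel as a function of the (Nat) module index
def pvG (i : Nat) : Int := fuelFor (100 + PySem.Int.mod ((i : Int) * 37 + 13) 900)
def pvL (m : Nat) : List Int := (List.range m).map pvG
def pvSum (m : Nat) : Int := (pvL m).sum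
def pvMax (m : Nat) : Int := (pvL m).foldl max 0
def pvCnt (m : Nat) : Int := ((pvL m).map (fun f => if f > 0 then (1 : Int) else 0)).sum

theorem fuelB_stop (k : Nat) (m acc : Int) (h : m ≤ 0) : fuelB k m acc = acc := by
  cases k with
  | zero => rfl
  | succ k => rw [fuelB, if_pos h]

theorem fuelA_eq_fuelB : ∀ (k k2 : Nat) (m acc : Int), m.toNat ≤ k →
    (PySem.Int.floordiv m 3 - 2).toNat ≤ k2 →
    fuelA k m acc = fuelB k2 (PySem.Int.floordiv m 3 - 2) acc := by
  intro k
  induction k with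
  | zero =>
    intro k2 m acc hk _
    have h3 := PySem.Int.floordiv_eq_ediv_of_pos (a := m) (b := 3) (by norm_num)
    rw [fuelA, fuelB_stop _ _ _ (by omega)]
  | succ k ih =>
    intro k2 m acc hk hk2
    have h3 := PySem.Int.floordiv_eq_ediv_of_pos (a := m) (b := 3) (by norm_num)
    by_cases h : PySem.Int.floordiv m 3 - 2 ≤ 0
    · rw [fuelA, if_pos h, fuelB_stop _ _ _ h]
    · have hm9 : 9 ≤ m := by omega
      obtain ⟨k2', rfl⟩ : ∃ k2', k2 = k2' + 1 := ⟨k2 - 1, by omega⟩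
      rw [fuelA, if_neg h, fuelB, if_neg h]
      have h3' := PySem.Int.floordiv_eq_ediv_of_pos (a := PySem.Int.floordiv m 3 - 2) (b := 3) (by norm_num)
      exact ih k2' _ _ (by omega) (by omega)

theorem fuelB_nonneg : ∀ (k : Nat) (m acc : Int), 0 ≤ acc → 0 ≤ fuelB k m acc := by
  intro k
  induction k with
  | zero => intro m acc h0; exact h0
  | succ k ih =>
    intro m acc h0
    rw [fuelB]
    by_cases h : m ≤ 0
    · rw [if_pos h]; exact h0
    · rw [if_neg h]; exact ih _ _ (by omega)

theorem pvG_nonneg (i : Nat) : 0 ≤ pvG i := fuelB_nonneg _ _ _ le_rfl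

theorem pvG_period (i : Nat) : pvG (900 + i) = pvG i := by
  unfold pvG
  congr 2
  rw [PySem.Int.mod_eq_emod_of_pos (by norm_num), PySem.Int.mod_eq_emod_of_pos (by norm_num)]
  push_cast
  omega

theorem pvL_add (m : Nat) : pvL (900 + m) = pvL 900 ++ pvL m := by
  unfold pvL
  rw [List.range_add, List.map_append, List.map_map]
  congr 1
  exact List.map_congr_left (fun x _ => pvG_period x)

theorem foldl_max_shift (xs : List Int) : ∀ b : Int, 0 ≤ b →
    xs.foldl max b = max b (xs.foldl max 0) := by
  induction xs with
  | nil => intro b hb; simp [List.foldl]; omega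
  | cons x t ih =>
    intro b hb
    have h1 : (x :: t).foldl max b = t.foldl max (max b x) := rfl
    have h2 : (x :: t).foldl max 0 = t.foldl max (max 0 x) := rfl
    rw [h1, h2, ih (max b x) (by omega), ih (max 0 x) (by omega)]
    omega

theorem foldl_split (xs : List Int) : ∀ t mx c : Int,
    xs.foldl (fun (st : Int × Int × Int) x =>
      (st.1 + x, if x > st.2.1 then x else st.2.1, if x > 0 then st.2.2 + 1 else st.2.2)) (t, mx, c)
    = (t + xs.sum, xs.foldl max mx, c + (xs.map (fun f => if f > 0 then (1 : Int) else 0)).sum) := by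
  induction xs with
  | nil => intro t mx c; simp
  | cons x l ih =>
    intro t mx c
    simp only [List.foldl_cons, List.map_cons, List.sum_cons, ih]
    have hmax : (if x > mx then x else mx) = max mx x := by
      by_cases h : x > mx <;> simp [h] <;> omega
    rw [hmax]
    have h1 : t + x + l.sum = t + (x + l.sum) := by ring
    have h2 : (if x > 0 then c + 1 else c) + (l.map (fun f => if f > 0 then (1 : Int) else 0)).sum
        = c + ((if x > 0 then (1 : Int) else 0) + (l.map (fun f => if f > 0 then (1 : Int) else 0)).sum) := by
      by_cases h : x > 0 <;> simp [h] <;> omega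
    rw [h1, h2]

-- A's result as the three periodic aggregates
theorem A_char (N : Nat) : advent_fuel_calc (N : Int) = [pvSum N, pvMax N, pvCnt N] := by
  unfold advent_fuel_calc
  rw [PySem.List.pyRange_zero_nat, List.foldl_map]
  have hfuel : ∀ m : Int, fuelA m.toNat m 0 = fuelFor m := fun m =>
    fuelA_eq_fuelB m.toNat (PySem.Int.floordiv m 3 - 2).toNat m 0 le_rfl le_rfl
  have hbody : (fun (st : Int × Int × Int) (k : Nat) =>
      (st.1 + fuelA (100 + PySem.Int.mod ((k : Int) * 37 + 13) 900).toNat (100 + PySem.Int.mod ((k : Int) * 37 + 13) 900) 0,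
       if fuelA (100 + PySem.Int.mod ((k : Int) * 37 + 13) 900).toNat (100 + PySem.Int.mod ((k : Int) * 37 + 13) 900) 0 > st.2.1
         then fuelA (100 + PySem.Int.mod ((k : Int) * 37 + 13) 900).toNat (100 + PySem.Int.mod ((k : Int) * 37 + 13) 900) 0 else st.2.1,
       if fuelA (100 + PySem.Int.mod ((k : Int) * 37 + 13) 900).toNat (100 + PySem.Int.mod ((k : Int) * 37 + 13) 900) 0 > 0 then st.2.2 + 1 else st.2.2))
      = (fun (st : Int × Int × Int) (k : Nat) =>
      (st.1 + pvG k, if pvG k > st.2.1 then pvG k else st.2.1,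
       if pvG k > 0 then st.2.2 + 1 else st.2.2)) := by
    funext st k
    rw [hfuel]
    rfl
  simp only [hbody]
  have := foldl_split ((List.range N).map pvG) 0 0 0
  rw [List.foldl_map] at this
  simp only [this]
  simp [pvSum, pvMax, pvCnt, pvL]

theorem pvSum_period (q r : Nat) : pvSum (900 * q + r) = q * pvSum 900 + pvSum r := by
  induction q with
  | zero => simp
  | succ q ih =>
    have h : 900 * (q + 1) + r = 900 + (900 * q + r) := by ring
    rw [h]
    unfold pvSum
    rw [pvL_add, List.sum_append]
    have ihs : (pvL (900 * q + r)).sum = (q : Int) * (pvL 900).sum + (pvL r).sum := ih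
    rw [ihs]
    push_cast
    ring

theorem pvCnt_period (q r : Nat) : pvCnt (900 * q + r) = q * pvCnt 900 + pvCnt r := by
  induction q with
  | zero => simp
  | succ q ih =>
    have h : 900 * (q + 1) + r = 900 + (900 * q + r) := by ring
    rw [h]
    unfold pvCnt
    rw [pvL_add, List.map_append, List.sum_append]
    have ihs : ((pvL (900 * q + r)).map (fun f => if f > 0 then (1 : Int) else 0)).sum
        = (q : Int) * ((pvL 900).map (fun f => if f > 0 then (1 : Int) else 0)).sum
          + ((pvL r).map (fun f => if f > 0 then (1 : Int) else 0)).sum := ih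
    rw [ihs]
    push_cast
    ring

theorem pvMax_nonneg (m : Nat) : 0 ≤ pvMax m := (PySem.List.le_foldl_max (pvL m) 0).1

theorem pvMax_add (m : Nat) : pvMax (900 + m) = max (pvMax 900) (pvMax m) := by
  unfold pvMax
  rw [pvL_add, List.foldl_append]
  exact foldl_max_shift (pvL m) _ (pvMax_nonneg 900)

theorem pvMax_period (q r : Nat) (hq : 0 < q) :
    pvMax (900 * q + r) = max (pvMax 900) (pvMax r) := by
  induction q with
  | zero => omega
  | succ q ih =>
    have h : 900 * (q + 1) + r = 900 + (900 * q + r) := by ring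
    rw [h, pvMax_add]
    rcases Nat.eq_zero_or_pos q with h0 | hpos
    · subst h0; simp
    · rw [ih hpos]
      omega

theorem pvMax_le_add (r m : Nat) : pvMax r ≤ pvMax (r + m) := by
  unfold pvMax pvL
  rw [List.range_add, List.map_append, List.foldl_append]
  exact (PySem.List.le_foldl_max _ _).1

theorem pvL_mem_nonneg (m : Nat) : ∀ x ∈ pvL m, 0 ≤ x := by
  intro x hx
  rcases List.mem_map.mp hx with ⟨i, _, rfl⟩
  exact pvG_nonneg i

theorem maxD_eq_pvMax (m : Nat) : PySem.List.maxD (pvL m) (fun x => x) 0 = pvMax m := by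
  cases hm : pvL m with
  | nil => simp [PySem.List.maxD, PySem.List.max?, pvMax, hm]
  | cons x t =>
    have hx : 0 ≤ x := pvL_mem_nonneg m x (hm ▸ List.mem_cons_self ..)
    unfold PySem.List.maxD
    rw [PySem.List.max?_id_cons]
    have : pvMax m = t.foldl max (max 0 x) := by rw [pvMax, hm]; rfl
    rw [this, Option.getD_some]
    congr 1
    omega

-- the B-side fuels list is pvL 900
theorem fuels_eq : ((PySem.List.pyRange 0 900 1).map
    (fun i => fuelFor (100 + PySem.Int.mod (i * 37 + 13) 900))) = pvL 900 := by
  have h : (900 : Int) = ((900 : Nat) : Int) := by norm_num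
  rw [h, PySem.List.pyRange_zero_nat, List.map_map]
  rfl

theorem pvL_take (r : Nat) (hr : r ≤ 900) : (pvL 900).take r = pvL r := by
  unfold pvL
  rw [← List.map_take, List.take_range, Nat.min_eq_left hr]

theorem advent_fuel_calc_spec' (n : Int) : advent_fuel_calc n = advent_fuel_calc_alt n := by
  by_cases hn : n ≤ 0
  · unfold advent_fuel_calc advent_fuel_calc_alt
    rw [PySem.List.pyRange_one_eq_nil (by omega), if_pos hn]
    rfl
  · have hN : n = ((n.toNat : Nat) : Int) := (Int.toNat_of_nonneg (by omega)).symm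
    set N := n.toNat with hNdef
    have hq : N = 900 * (N / 900) + N % 900 := (Nat.div_add_mod N 900).symm
    have hrlt : N % 900 < 900 := Nat.mod_lt _ (by norm_num)
    have hNpos : 0 < N := by omega
    rw [hN, A_char]
    unfold advent_fuel_calc_alt
    rw [if_neg (by omega)]
    simp only [fuels_eq]
    have h900 : (900 : Int) = ((900 : Nat) : Int) := by norm_num
    rw [h900, PySem.Int.floordiv_natCast, PySem.Int.mod_natCast,
      PySem.List.slice_to_natCast, pvL_take _ (le_of_lt hrlt)]
    have hsum : pvSum N = (N / 900 : Nat) * pvSum 900 + pvSum (N % 900) := by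
      conv_lhs => rw [hq]
      exact pvSum_period _ _
    have hcnt : pvCnt N = (N / 900 : Nat) * pvCnt 900 + pvCnt (N % 900) := by
      conv_lhs => rw [hq]
      exact pvCnt_period _ _
    have hmaxv : pvMax N = if ((N / 900 : Nat) : Int) > 0 then pvMax 900 else pvMax (N % 900) := by
      rcases Nat.eq_zero_or_pos (N / 900) with h0 | hpos
      · rw [if_neg (by simp [h0])]
        conv_lhs => rw [hq, h0]
        norm_num
      · rw [if_pos (by exact_mod_cast hpos)]
        conv_lhs => rw [hq]
        rw [pvMax_period _ _ hpos]
        have hle : pvMax (N % 900) ≤ pvMax 900 := by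
          have := pvMax_le_add (N % 900) (900 - N % 900)
          rwa [Nat.add_sub_cancel' (le_of_lt hrlt)] at this
        omega
    rw [hsum, hcnt, hmaxv]
    simp only [pvSum, pvCnt, pvMax, maxD_eq_pvMax]

-- ===== VERDICT (by name: the statement is the Claim_ definition above) =====
theorem advent_fuel_calc_spec : Claim_equal_advent_fuel_calc := by
  intro n _
  unfold Spec_advent_fuel_calc
  exact advent_fuel_calc_spec' n
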